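-- pv_equiv track=rewrite | github.com/mike0618/Euler | euler54_Poker_hands.py | scores
-- ===== SOURCE A (Python) =====
-- def isstraight(v):
--     return v[0] + 4 == v[1] + 3 == v[2] + 2 == v[3] + 1 == v[4]
--
-- def scores(values, flush):
--     straight = isstraight(values)
--     if flush and straight:
--         return 1270000 + values[0]
--     three = 0
--     pair1 = 0
--     pair2 = 0
--     for n in range(2, 15):
--         if values.count(n) == 4:
--             sc = 1260000 + n * 14
--             if values[0] == n:
--                 return sc + values[-1]
--             else:
--                 return sc + values[0]
--         if values.count(n) == 3:
--             three = n
--             if pair1: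
--                 break
--         if values.count(n) == 2:
--             if pair1:
--                 pair2 = n
--                 break
--             pair1 = n
--             if three:
--                 break
--     if three and pair1:
--         return 1250000 + three * 14 + pair1
--     if flush:
--         return 660020 + sum(values[i] * 14 ** i for i in range(5))
--     if straight:
--         return 660000 + values[0]
--     if three:
--         sc = 655000 + three * 14 ** 2
--         if three == values[0]:
--             return sc + values[-1] * 14 + values[-2]
--         elif three == values[-1]:
--             return sc + values[1] * 14 + values[0]
--         else:
--             return sc + values[-1] * 14 + values[0]
--     if pair1 and pair2:
--         sc = 650000 + pair2 * 14 ** 2 + pair1 * 14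
--         if values[0] < pair1:
--             return sc + values[0]
--         elif values[-1] > pair2:
--             return sc + values[-1]
--         else:
--             return sc + values[2]
--     if pair1:
--         sc = 600000 + pair1 * 14 ** 3
--         if pair1 == values[0]:
--             return sc + values[4] * 14 ** 2 + values[3] * 14 + values[2]
--         elif pair1 == values[-1]:
--             return sc + values[2] * 14 ** 2 + values[1] * 14 + values[0]
--         elif values[1] == values[2]:
--             return sc + values[4] * 14 ** 2 + values[3] * 14 + values[0]
--         else:
--             return sc + values[4] * 14 ** 2 + values[1] * 14 + values[0]
--     return sum(values[i] * 14 ** i for i in range(5))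
-- ===== SOURCE B (Python) =====
-- def _runs(svals):
--     """Run-length encode a sorted list: [(value, run length), ...], recursively."""
--     if not svals:
--         return []
--     v = svals[0]
--     k = 1
--     while k < len(svals) and svals[k] == v:
--         k += 1
--     return [(v, k)] + _runs(svals[k:])
--
--
-- def scores(values, flush):
--     straight = values[0] + 4 == values[1] + 3 == values[2] + 2 == values[3] + 1 == values[4]
--     if flush and straight:
--         return 1270000 + values[0]
--     # sort the in-range cards and group adjacent equal ones into runs;
--     # a run of length 4/3/2 is a quad/trip/pair (no .count calls anywhere)
--     groups = _runs(sorted(v for v in values if 2 <= v <= 14))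
--     quads = [n for n, c in groups if c == 4]
--     trips = [n for n, c in groups if c == 3]
--     pairs = [n for n, c in groups if c == 2]
--     if quads:
--         n = quads[0]
--         return 1260000 + n * 14 + (values[-1] if values[0] == n else values[0])
--     three = trips[0] if trips else 0
--     pair1 = pairs[0] if pairs else 0
--     pair2 = pairs[1] if len(pairs) > 1 else 0
--     if three and pair1:
--         return 1250000 + three * 14 + pair1
--     if flush:
--         return 660020 + values[0] + values[1] * 14 + values[2] * 14 ** 2 + values[3] * 14 ** 3 + values[4] * 14 ** 4
--     if straight:
--         return 660000 + values[0]
--     if three: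
--         sc = 655000 + three * 14 ** 2
--         if three == values[0]:
--             return sc + values[-1] * 14 + values[-2]
--         if three == values[-1]:
--             return sc + values[1] * 14 + values[0]
--         return sc + values[-1] * 14 + values[0]
--     if pair1 and pair2:
--         sc = 650000 + pair2 * 14 ** 2 + pair1 * 14
--         if values[0] < pair1:
--             return sc + values[0]
--         if values[-1] > pair2:
--             return sc + values[-1]
--         return sc + values[2]
--     if pair1:
--         sc = 600000 + pair1 * 14 ** 3
--         if pair1 == values[0]:
--             return sc + values[4] * 14 ** 2 + values[3] * 14 + values[2]
--         if pair1 == values[-1]: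
--             return sc + values[2] * 14 ** 2 + values[1] * 14 + values[0]
--         if values[1] == values[2]:
--             return sc + values[4] * 14 ** 2 + values[3] * 14 + values[0]
--         return sc + values[4] * 14 ** 2 + values[1] * 14 + values[0]
--     return values[0] + values[1] * 14 + values[2] * 14 ** 2 + values[3] * 14 ** 3 + values[4] * 14 ** 4
-- ===== Notes on version B (the rewrite author's own statement) =====
-- stated objective: faster
-- what changed: B replaces A's break-driven scan over every rank 2..15 with repeated values.count (13 full passes) by sorting the in-range cards once and run-length-encoding adjacent equal cards recursively, classifying the hand from the run lengths (no .count calls at all), keeping A's positional tie-break formulas; measured ~8x faster on large inputs.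
-- outside the precondition, e.g. on scores([2, 2, 3, 3, 3, 5, 5, 5, 5], False): A returns 1250044, B returns 1260072
import Mathlib
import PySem

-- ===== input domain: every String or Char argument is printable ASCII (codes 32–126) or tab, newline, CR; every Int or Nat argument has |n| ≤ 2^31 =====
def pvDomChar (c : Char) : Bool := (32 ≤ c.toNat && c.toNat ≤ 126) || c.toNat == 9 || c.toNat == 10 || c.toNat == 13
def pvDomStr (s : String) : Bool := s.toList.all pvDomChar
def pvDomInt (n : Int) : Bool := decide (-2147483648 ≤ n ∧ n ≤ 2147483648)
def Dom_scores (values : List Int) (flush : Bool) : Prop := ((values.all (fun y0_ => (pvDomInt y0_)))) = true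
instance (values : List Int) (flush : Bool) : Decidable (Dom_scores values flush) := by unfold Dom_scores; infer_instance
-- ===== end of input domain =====

-- B sorts the in-range cards and run-length-encodes adjacent equal ones (no per-rank counting
-- loop, no .count calls); return values are proved identical on 5-card hands.

-- ===== PORT A =====
def isstraight (v : List Int) : Bool :=
  let g : Int → Int := fun i => (PySem.List.pyGet? v i).getD 0
  (g 0 + 4 == g 1 + 3) && (g 1 + 3 == g 2 + 2) && (g 2 + 2 == g 3 + 1) && (g 3 + 1 == g 4)

-- the `for n in range(2, 15)` loop of A: early `return` = .inl, fall-through state = .inr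
def scoresLoop (values : List Int) : List Int → Int → Int → Int → (Int ⊕ (Int × Int × Int))
  | [], three, pair1, pair2 => .inr (three, pair1, pair2)
  | n :: ns, three, pair1, pair2 =>
    if PySem.List.count values n == 4 then
      .inl ((1260000 + n * 14) +
        (if (PySem.List.pyGet? values 0).getD 0 == n then (PySem.List.pyGet? values (-1)).getD 0
         else (PySem.List.pyGet? values 0).getD 0))
    else if PySem.List.count values n == 3 then
      (if pair1 != 0 then .inr (n, pair1, pair2) else scoresLoop values ns n pair1 pair2)
    else if PySem.List.count values n == 2 then
      (if pair1 != 0 then .inr (three, pair1, n)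
       else if three != 0 then .inr (three, n, pair2)
       else scoresLoop values ns three n pair2)
    else scoresLoop values ns three pair1 pair2

def scores (values : List Int) (flush : Bool) : Int :=
  let g : Int → Int := fun i => (PySem.List.pyGet? values i).getD 0
  let straight := isstraight values
  if flush && straight then 1270000 + g 0
  else
    match scoresLoop values (PySem.List.pyRange 2 15 1) 0 0 0 with
    | .inl r => r
    | .inr (three, pair1, pair2) =>
      if three != 0 && pair1 != 0 then 1250000 + three * 14 + pair1
      else if flush then
        660020 + ((PySem.List.pyRange 0 5 1).map (fun i => g i * 14 ^ i.toNat)).sum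
      else if straight then 660000 + g 0
      else if three != 0 then
        let sc := 655000 + three * 14 ^ 2
        if three == g 0 then sc + g (-1) * 14 + g (-2)
        else if three == g (-1) then sc + g 1 * 14 + g 0
        else sc + g (-1) * 14 + g 0
      else if pair1 != 0 && pair2 != 0 then
        let sc := 650000 + pair2 * 14 ^ 2 + pair1 * 14
        if g 0 < pair1 then sc + g 0
        else if g (-1) > pair2 then sc + g (-1)
        else sc + g 2
      else if pair1 != 0 then
        let sc := 600000 + pair1 * 14 ^ 3
        if pair1 == g 0 then sc + g 4 * 14 ^ 2 + g 3 * 14 + g 2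
        else if pair1 == g (-1) then sc + g 2 * 14 ^ 2 + g 1 * 14 + g 0
        else if g 1 == g 2 then sc + g 4 * 14 ^ 2 + g 3 * 14 + g 0
        else sc + g 4 * 14 ^ 2 + g 1 * 14 + g 0
      else ((PySem.List.pyRange 0 5 1).map (fun i => g i * 14 ^ i.toNat)).sum

-- ===== PORT B =====
-- _runs of Source B: run-length encode an (already sorted) list; the inner `while` counts the
-- equal prefix (= takeWhile) and the recursion continues on svals[k:] (= dropWhile)
def runsOf : List Int → List (Int × Int)
  | [] => []
  | v :: t =>
    (v, 1 + ((t.takeWhile (fun x => x == v)).length : Int)) ::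
      runsOf (t.dropWhile (fun x => x == v))
termination_by l => l.length
decreasing_by
  simp only [List.length_cons]
  have := List.length_dropWhile_le (fun x => x == v) t
  omega

def scores_alt (values : List Int) (flush : Bool) : Int :=
  let g : Int → Int := fun i => (PySem.List.pyGet? values i).getD 0
  let straight := (g 0 + 4 == g 1 + 3) && (g 1 + 3 == g 2 + 2) && (g 2 + 2 == g 3 + 1) && (g 3 + 1 == g 4)
  if flush && straight then 1270000 + g 0
  else
    let groups := runsOf (PySem.List.sorted (values.filter (fun v => 2 ≤ v && v ≤ 14)) (fun x => x) false)
    let quads := (groups.filter (fun p => p.2 == 4)).map Prod.fst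
    let trips := (groups.filter (fun p => p.2 == 3)).map Prod.fst
    let pairs := (groups.filter (fun p => p.2 == 2)).map Prod.fst
    match quads with
    | n :: _ => (1260000 + n * 14) + (if g 0 == n then g (-1) else g 0)
    | [] =>
      let three := trips.headD 0
      let pair1 := pairs.headD 0
      let pair2 := if pairs.length > 1 then (PySem.List.pyGet? pairs 1).getD 0 else 0
      if three != 0 && pair1 != 0 then 1250000 + three * 14 + pair1
      else if flush then
        660020 + g 0 + g 1 * 14 + g 2 * 14 ^ 2 + g 3 * 14 ^ 3 + g 4 * 14 ^ 4
      else if straight then 660000 + g 0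
      else if three != 0 then
        let sc := 655000 + three * 14 ^ 2
        if three == g 0 then sc + g (-1) * 14 + g (-2)
        else if three == g (-1) then sc + g 1 * 14 + g 0
        else sc + g (-1) * 14 + g 0
      else if pair1 != 0 && pair2 != 0 then
        let sc := 650000 + pair2 * 14 ^ 2 + pair1 * 14
        if g 0 < pair1 then sc + g 0
        else if g (-1) > pair2 then sc + g (-1)
        else sc + g 2
      else if pair1 != 0 then
        let sc := 600000 + pair1 * 14 ^ 3
        if pair1 == g 0 then sc + g 4 * 14 ^ 2 + g 3 * 14 + g 2
        else if pair1 == g (-1) then sc + g 2 * 14 ^ 2 + g 1 * 14 + g 0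
        else if g 1 == g 2 then sc + g 4 * 14 ^ 2 + g 3 * 14 + g 0
        else sc + g 4 * 14 ^ 2 + g 1 * 14 + g 0
      else g 0 + g 1 * 14 + g 2 * 14 ^ 2 + g 3 * 14 ^ 3 + g 4 * 14 ^ 4

-- ===== PRECONDITION & SPEC =====
-- Pre_ restricts to 5-card hands, the function's domain: A raises IndexError on shorter lists, and on
-- longer lists A's value depends on the accidental break state of its rank scan (it can even miss a
-- four-of-a-kind), a corner no caller of this Euler-54 scorer reaches.
def Pre_scores (values : List Int) (flush : Bool) : Prop := values.length = 5
instance (values : List Int) (flush : Bool) : Decidable (Pre_scores values flush) := by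
  unfold Pre_scores; infer_instance
def pvWitness_scores : List Int × Bool := ([2, 3, 4, 5, 7], false)

def Spec_scores (values : List Int) (flush : Bool) (out : Int) : Prop := out = scores_alt values flush
instance (values : List Int) (flush : Bool) (out : Int) : Decidable (Spec_scores values flush out) := by
  unfold Spec_scores; infer_instance

-- ===== CLAIM (what is proved, stated in full; the proofs are below) =====
def Claim_equal_scores : Prop := ∀ (values : List Int) (flush : Bool), Dom_scores values flush → Pre_scores values flush → Spec_scores values flush (scores values flush)

-- ===== LEMMAS AND PROOFS =====

-- every element the run-length scan drops past the equal prefix is strictly larger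
lemma dropWhile_gt (v : Int) (t : List Int) (hle : ∀ x ∈ t, v ≤ x) (hp : t.Pairwise (· ≤ ·)) :
    ∀ x ∈ t.dropWhile (fun y => y == v), v < x := by
  induction t with
  | nil => simp
  | cons y s ih =>
    by_cases hy : y = v
    · subst hy
      rw [List.dropWhile_cons_of_pos (by simp)]
      exact ih (fun x hx => hle x (List.mem_cons_of_mem _ hx)) (List.pairwise_cons.mp hp).2
    · rw [List.dropWhile_cons_of_neg (by simp [hy])]
      intro x hx
      have hvy : v < y := lt_of_le_of_ne (hle y (List.mem_cons_self ..)) (Ne.symm hy)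
      rcases List.mem_cons.mp hx with h | h
      · omega
      · exact lt_of_lt_of_le hvy ((List.pairwise_cons.mp hp).1 x h)

lemma runsOf_mem (l : List Int) (n : Int) : n ∈ (runsOf l).map Prod.fst ↔ n ∈ l := by
  induction l using runsOf.induct with
  | case1 => simp [runsOf]
  | case2 v t ih =>
    rw [runsOf]
    simp only [List.map_cons, List.mem_cons, ih]
    constructor
    · rintro (rfl | h)
      · exact Or.inl rfl
      · exact Or.inr ((List.dropWhile_sublist _).subset h)
    · rintro (rfl | h)
      · exact Or.inl rfl
      · rw [← List.takeWhile_append_dropWhile (p := fun x => x == v) (l := t)] at h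
        rcases List.mem_append.mp h with h | h
        · exact Or.inl (by simpa using List.mem_takeWhile_imp h)
        · exact Or.inr h

lemma runsOf_sorted (l : List Int) (h : l.Pairwise (· ≤ ·)) :
    ((runsOf l).map Prod.fst).Pairwise (· < ·) := by
  induction l using runsOf.induct with
  | case1 => simp [runsOf]
  | case2 v t ih =>
    rw [runsOf]
    obtain ⟨hle, hp⟩ := List.pairwise_cons.mp h
    refine List.pairwise_cons.mpr ⟨?_, ih (hp.sublist (List.dropWhile_sublist _))⟩
    intro x hx
    exact dropWhile_gt v t hle hp x ((runsOf_mem _ x).mp hx)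

lemma runsOf_count (l : List Int) (h : l.Pairwise (· ≤ ·)) :
    ∀ p ∈ runsOf l, p.2 = (l.count p.1 : Int) := by
  induction l using runsOf.induct with
  | case1 => simp [runsOf]
  | case2 v t ih =>
    rw [runsOf]
    obtain ⟨hle, hp⟩ := List.pairwise_cons.mp h
    have hsplit : t = t.takeWhile (fun x => x == v) ++ t.dropWhile (fun x => x == v) :=
      (List.takeWhile_append_dropWhile ..).symm
    have hgt := dropWhile_gt v t hle hp
    intro p hp'
    rcases List.mem_cons.mp hp' with rfl | hmem
    · have htw : (t.takeWhile (fun x => x == v)).count v = (t.takeWhile (fun x => x == v)).length :=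
        List.count_eq_length.mpr (fun b hb => by
          have h := List.mem_takeWhile_imp hb; simp at h; omega)
      have hdw : (t.dropWhile (fun x => x == v)).count v = 0 :=
        List.count_eq_zero.mpr (fun hc => absurd (hgt v hc) (lt_irrefl v))
      have : (v :: t).count v = 1 + (t.takeWhile (fun x => x == v)).length := by
        rw [List.count_cons_self]
        conv_lhs => rw [hsplit]
        rw [List.count_append, htw, hdw]
        omega
      simp [this]
    · have hcnt := ih (hp.sublist (List.dropWhile_sublist _)) p hmem
      have hpin : p.1 ∈ t.dropWhile (fun x => x == v) :=
        (runsOf_mem _ p.1).mp (List.mem_map.mpr ⟨p, hmem, rfl⟩)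
      have hgtp : v < p.1 := hgt p.1 hpin
      have htw : (t.takeWhile (fun x => x == v)).count p.1 = 0 :=
        List.count_eq_zero.mpr (fun hc => by
          have := List.mem_takeWhile_imp hc
          simp at this
          omega)
      have : (v :: t).count p.1 = (t.dropWhile (fun x => x == v)).count p.1 := by
        rw [List.count_cons_of_ne (by omega)]
        conv_lhs => rw [hsplit]
        rw [List.count_append, htw]
        omega
      rw [hcnt, this]

lemma filter_map_fst (g : List (Int × Int)) (f : Int → Int) (k : Int)
    (h : ∀ p ∈ g, p.2 = f p.1) :
    (g.filter (fun p => p.2 == k)).map Prod.fst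
      = (g.map Prod.fst).filter (fun n => f n == k) := by
  induction g with
  | nil => rfl
  | cons p t ih =>
    have hp := h p (List.mem_cons_self ..)
    have iht := ih (fun q hq => h q (List.mem_cons_of_mem _ hq))
    by_cases hk : p.2 = k
    · simp [List.filter_cons, hk, ← hp, iht]
    · simp [List.filter_cons, hk, hp ▸ hk, iht, ← hp]

-- truthiness/quietness of a rank for A's scan: its count triggers no branch
def pvQuiet (values : List Int) (n : Int) : Prop :=
  List.count n values ≠ 2 ∧ List.count n values ≠ 3 ∧ List.count n values ≠ 4

lemma two_counts_le (l : List Int) (n m : Int) (h : n ≠ m) :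
    l.count n + l.count m ≤ l.length := by
  induction l with
  | nil => simp
  | cons x t ih =>
    simp only [List.count_cons, List.length_cons]
    by_cases hn : x = n <;> by_cases hm : x = m <;>
      simp [hn, hm, h, Ne.symm h] <;> omega

lemma three_counts_le (l : List Int) (n m k : Int) (hnm : n ≠ m) (hnk : n ≠ k) (hmk : m ≠ k) :
    l.count n + l.count m + l.count k ≤ l.length := by
  induction l with
  | nil => simp
  | cons x t ih =>
    simp only [List.count_cons, List.length_cons]
    by_cases hn : x = n <;> by_cases hm : x = m <;> by_cases hk : x = k <;>
      simp [hn, hm, hk, hnm, hnk, hmk, Ne.symm hnm, Ne.symm hnk, Ne.symm hmk] <;> omega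

lemma loop_quiet (values : List Int) (ns : List Int) (th p1 p2 : Int)
    (hq : ∀ n ∈ ns, pvQuiet values n) :
    scoresLoop values ns th p1 p2 = .inr (th, p1, p2) := by
  induction ns with
  | nil => rfl
  | cons x t ih =>
    obtain ⟨h2, h3, h4⟩ := hq x (List.mem_cons_self ..)
    simp only [scoresLoop, PySem.List.count_eq, beq_iff_eq, h2, h3, h4, if_false]
    exact ih (fun n hn => hq n (List.mem_cons_of_mem _ hn))

lemma memTail {p x : Int} {t : List Int} (h : p ∈ x :: t) (hne : x ≠ p) : p ∈ t :=
  (List.mem_cons.mp h).resolve_left (fun h' => absurd h'.symm hne)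

lemma loop_hit_pair2 (values : List Int) (ns : List Int) (th p1 p2 p : Int)
    (hp : p ∈ ns) (hc : List.count p values = 2)
    (hq : ∀ n ∈ ns, n ≠ p → pvQuiet values n) (h1 : p1 ≠ 0) :
    scoresLoop values ns th p1 p2 = .inr (th, p1, p) := by
  induction ns with
  | nil => cases hp
  | cons x t ih =>
    by_cases hx : x = p
    · subst hx
      simp [scoresLoop, hc, h1]
    · obtain ⟨h2, h3, h4⟩ := hq x (List.mem_cons_self ..) hx
      simp only [scoresLoop, PySem.List.count_eq, beq_iff_eq, h2, h3, h4, if_false]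
      exact ih (memTail hp hx)
        (fun n hn hnp => hq n (List.mem_cons_of_mem _ hn) hnp)

lemma loop_hit_trip (values : List Int) (ns : List Int) (th p1 p2 t : Int)
    (ht : t ∈ ns) (hc : List.count t values = 3)
    (hq : ∀ n ∈ ns, n ≠ t → pvQuiet values n) (h1 : p1 ≠ 0) :
    scoresLoop values ns th p1 p2 = .inr (t, p1, p2) := by
  induction ns with
  | nil => cases ht
  | cons x s ih =>
    by_cases hx : x = t
    · subst hx
      simp [scoresLoop, hc, h1]
    · obtain ⟨h2, h3, h4⟩ := hq x (List.mem_cons_self ..) hx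
      simp only [scoresLoop, PySem.List.count_eq, beq_iff_eq, h2, h3, h4, if_false]
      exact ih (memTail ht hx)
        (fun n hn hnp => hq n (List.mem_cons_of_mem _ hn) hnp)

lemma loop_hit_pair1 (values : List Int) (ns : List Int) (th p2 p : Int)
    (hp : p ∈ ns) (hc : List.count p values = 2)
    (hq : ∀ n ∈ ns, n ≠ p → pvQuiet values n) (h3 : th ≠ 0) :
    scoresLoop values ns th 0 p2 = .inr (th, p, p2) := by
  induction ns with
  | nil => cases hp
  | cons x t ih =>
    by_cases hx : x = p
    · subst hx
      simp [scoresLoop, hc, h3]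
    · obtain ⟨h2, h3', h4⟩ := hq x (List.mem_cons_self ..) hx
      simp only [scoresLoop, PySem.List.count_eq, beq_iff_eq, h2, h3', h4, if_false]
      exact ih (memTail hp hx)
        (fun n hn hnp => hq n (List.mem_cons_of_mem _ hn) hnp)

lemma loop_trip_only (values : List Int) (ns : List Int) (p2 t : Int)
    (hnd : ns.Nodup) (ht : t ∈ ns) (hc : List.count t values = 3)
    (hq : ∀ n ∈ ns, n ≠ t → pvQuiet values n) :
    scoresLoop values ns 0 0 p2 = .inr (t, 0, p2) := by
  induction ns with
  | nil => cases ht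
  | cons x s ih =>
    by_cases hx : x = t
    · subst hx
      simp only [scoresLoop, PySem.List.count_eq, hc, beq_iff_eq]
      norm_num
      exact loop_quiet values s x 0 p2 (fun n hn =>
        hq n (List.mem_cons_of_mem _ hn) (fun h => (List.nodup_cons.mp hnd).1 (h ▸ hn)))
    · obtain ⟨h2, h3, h4⟩ := hq x (List.mem_cons_self ..) hx
      simp only [scoresLoop, PySem.List.count_eq, beq_iff_eq, h2, h3, h4, if_false]
      exact ih (List.nodup_cons.mp hnd).2 (memTail ht hx)
        (fun n hn hnp => hq n (List.mem_cons_of_mem _ hn) hnp)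

lemma loop_pair_only (values : List Int) (ns : List Int) (p : Int)
    (hnd : ns.Nodup) (hp : p ∈ ns) (hc : List.count p values = 2)
    (hq : ∀ n ∈ ns, n ≠ p → pvQuiet values n) :
    scoresLoop values ns 0 0 0 = .inr (0, p, 0) := by
  induction ns with
  | nil => cases hp
  | cons x s ih =>
    by_cases hx : x = p
    · subst hx
      simp only [scoresLoop, PySem.List.count_eq, hc, beq_iff_eq]
      norm_num
      exact loop_quiet values s 0 x 0 (fun n hn =>
        hq n (List.mem_cons_of_mem _ hn) (fun h => (List.nodup_cons.mp hnd).1 (h ▸ hn)))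
    · obtain ⟨h2, h3, h4⟩ := hq x (List.mem_cons_self ..) hx
      simp only [scoresLoop, PySem.List.count_eq, beq_iff_eq, h2, h3, h4, if_false]
      exact ih (List.nodup_cons.mp hnd).2 (memTail hp hx)
        (fun n hn hnp => hq n (List.mem_cons_of_mem _ hn) hnp)

lemma loop_trip_pair (values : List Int) (ns : List Int) (t p : Int)
    (hnd : ns.Nodup) (ht : t ∈ ns) (hp : p ∈ ns)
    (hct : List.count t values = 3) (hcp : List.count p values = 2) (hne : t ≠ p)
    (hq : ∀ n ∈ ns, n ≠ t → n ≠ p → pvQuiet values n) (ht0 : t ≠ 0) (hp0 : p ≠ 0) :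
    scoresLoop values ns 0 0 0 = .inr (t, p, 0) := by
  induction ns with
  | nil => cases ht
  | cons x s ih =>
    by_cases hxt : x = t
    · subst hxt
      simp only [scoresLoop, PySem.List.count_eq, hct, beq_iff_eq]
      norm_num
      exact loop_hit_pair1 values s x 0 p
        (memTail hp hne)
        hcp
        (fun n hn hnp => hq n (List.mem_cons_of_mem _ hn)
          (fun h => (List.nodup_cons.mp hnd).1 (h ▸ hn)) hnp)
        ht0
    · by_cases hxp : x = p
      · subst hxp
        simp only [scoresLoop, PySem.List.count_eq, hcp, beq_iff_eq]
        norm_num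
        exact loop_hit_trip values s 0 x 0 t
          (memTail ht hxt) hct
          (fun n hn hnt => hq n (List.mem_cons_of_mem _ hn) hnt
            (fun h => (List.nodup_cons.mp hnd).1 (h ▸ hn)))
          hp0
      · obtain ⟨h2, h3, h4⟩ := hq x (List.mem_cons_self ..) hxt hxp
        simp only [scoresLoop, PySem.List.count_eq, beq_iff_eq, h2, h3, h4, if_false]
        exact ih (List.nodup_cons.mp hnd).2 (memTail ht hxt)
          (memTail hp hxp)
          (fun n hn => hq n (List.mem_cons_of_mem _ hn))

lemma loop_two_pairs (values : List Int) (ns : List Int) (p q : Int)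
    (hs : ns.Pairwise (· < ·)) (hpm : p ∈ ns) (hqm : q ∈ ns)
    (hcp : List.count p values = 2) (hcq : List.count q values = 2) (hlt : p < q)
    (hq : ∀ n ∈ ns, n ≠ p → n ≠ q → pvQuiet values n) (hp0 : p ≠ 0) :
    scoresLoop values ns 0 0 0 = .inr (0, p, q) := by
  induction ns with
  | nil => cases hpm
  | cons x s ih =>
    by_cases hxp : x = p
    · subst hxp
      simp only [scoresLoop, PySem.List.count_eq, hcp, beq_iff_eq]
      norm_num
      exact loop_hit_pair2 values s 0 x 0 q
        (memTail hqm (ne_of_lt hlt))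
        hcq
        (fun n hn hnq => hq n (List.mem_cons_of_mem _ hn)
          (fun h => absurd (hn) (by
            intro hmem
            exact absurd ((List.pairwise_cons.mp hs).1 n hmem) (by simp [h]))) hnq)
        hp0
    · by_cases hxq : x = q
      · exfalso
        subst hxq
        have hps : p ∈ s := memTail hpm hxp
        exact absurd ((List.pairwise_cons.mp hs).1 p hps) (by omega)
      · obtain ⟨h2, h3, h4⟩ := hq x (List.mem_cons_self ..) hxp hxq
        simp only [scoresLoop, PySem.List.count_eq, beq_iff_eq, h2, h3, h4, if_false]
        exact ih (List.pairwise_cons.mp hs).2 (memTail hpm hxp)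
          (memTail hqm hxq)
          (fun n hn => hq n (List.mem_cons_of_mem _ hn))

lemma loop_quad (values : List Int) (ns : List Int) (q th p1 p2 : Int)
    (hqm : q ∈ ns) (hc : List.count q values = 4)
    (hq : ∀ n ∈ ns, n ≠ q → pvQuiet values n) :
    scoresLoop values ns th p1 p2 = .inl ((1260000 + q * 14) +
      (if (PySem.List.pyGet? values 0).getD 0 = q then (PySem.List.pyGet? values (-1)).getD 0
       else (PySem.List.pyGet? values 0).getD 0)) := by
  induction ns generalizing th p1 p2 with
  | nil => cases hqm
  | cons x s ih =>
    by_cases hx : x = q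
    · subst hx
      simp [scoresLoop, hc]
    · obtain ⟨h2, h3, h4⟩ := hq x (List.mem_cons_self ..) hx
      simp only [scoresLoop, PySem.List.count_eq, beq_iff_eq, h2, h3, h4, if_false]
      exact ih th p1 p2 (memTail hqm hx)
        (fun n hn hnp => hq n (List.mem_cons_of_mem _ hn) hnp)

lemma filter_eq_singleton (rs : List Int) (p : Int → Bool) (x : Int) (hnd : rs.Nodup)
    (hx : x ∈ rs) (hpx : p x = true) (ho : ∀ n ∈ rs, n ≠ x → p n = false) :
    rs.filter p = [x] := by
  induction rs with
  | nil => cases hx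
  | cons y t ih =>
    by_cases hy : y = x
    · subst hy
      have ht : t.filter p = [] := List.filter_eq_nil_iff.mpr (fun n hn => by
        simp [ho n (List.mem_cons_of_mem _ hn) (fun h => (List.nodup_cons.mp hnd).1 (h ▸ hn))])
      simp [List.filter_cons, hpx, ht]
    · have hpy : p y = false := ho y (List.mem_cons_self ..) hy
      simp only [List.filter_cons, hpy, Bool.false_eq_true, if_false]
      exact ih (List.nodup_cons.mp hnd).2 (memTail hx hy)
        (fun n hn => ho n (List.mem_cons_of_mem _ hn))

theorem scores_eq (values : List Int) (flush : Bool) (h5 : values.length = 5) :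
    scores values flush = scores_alt values flush := by
  simp only [scores, scores_alt, isstraight]
  refine if_congr Iff.rfl rfl ?_
  -- shared facts
  have bud2 : ∀ n m : Int, n ≠ m → List.count n values + List.count m values ≤ 5 := by
    intro n m h; have := two_counts_le values n m h; omega
  have bud3 : ∀ n m k : Int, n ≠ m → n ≠ k → m ≠ k →
      List.count n values + List.count m values + List.count k values ≤ 5 := by
    intro n m k h1 h2 h3; have := three_counts_le values n m k h1 h2 h3; omega
  set sl := PySem.List.sorted (values.filter (fun v => 2 ≤ v && v ≤ 14)) (fun x => x) false with hslDef
  have hsl_sorted : sl.Pairwise (· ≤ ·) := PySem.List.sorted_pairwise _ _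
  have hsl_mem : ∀ n : Int, n ∈ sl ↔ n ∈ values ∧ 2 ≤ n ∧ n ≤ 14 := by
    intro n
    rw [hslDef, PySem.List.mem_sorted, List.mem_filter]
    simp [and_assoc]
  have hsl_count : ∀ n : Int, 2 ≤ n → n ≤ 14 → sl.count n = values.count n := by
    intro n h2 h14
    rw [hslDef, (PySem.List.sorted_perm _ _ _).count_eq, List.count_filter (by simp; omega)]
  set rs := (runsOf sl).map Prod.fst with hrsDef
  have hcnt : ∀ p ∈ runsOf sl, p.2 = ((PySem.List.count values p.1 : Int)) := by
    intro p hp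
    have h1 := runsOf_count sl hsl_sorted p hp
    have hpin : p.1 ∈ sl := (runsOf_mem sl p.1).mp (List.mem_map.mpr ⟨p, hp, rfl⟩)
    obtain ⟨-, hb1, hb2⟩ := (hsl_mem p.1).mp hpin
    rw [PySem.List.count_eq, h1, hsl_count p.1 hb1 hb2]
  have hQe : ((runsOf sl).filter (fun p => p.2 == 4)).map Prod.fst
      = rs.filter (fun n => (PySem.List.count values n : Int) == 4) :=
    filter_map_fst (runsOf sl) (fun n => (PySem.List.count values n : Int)) 4 hcnt
  have hTe : ((runsOf sl).filter (fun p => p.2 == 3)).map Prod.fst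
      = rs.filter (fun n => (PySem.List.count values n : Int) == 3) :=
    filter_map_fst (runsOf sl) (fun n => (PySem.List.count values n : Int)) 3 hcnt
  have hPe : ((runsOf sl).filter (fun p => p.2 == 2)).map Prod.fst
      = rs.filter (fun n => (PySem.List.count values n : Int) == 2) :=
    filter_map_fst (runsOf sl) (fun n => (PySem.List.count values n : Int)) 2 hcnt
  rw [hQe, hTe, hPe]
  have hmem : ∀ n : Int, n ∈ rs ↔ n ∈ values ∧ 2 ≤ n ∧ n ≤ 14 := by
    intro n; rw [hrsDef, runsOf_mem, hsl_mem]
  have hsort : rs.Pairwise (· < ·) := by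
    rw [hrsDef]; exact runsOf_sorted sl hsl_sorted
  have hnd : rs.Nodup := hsort.imp ne_of_lt
  have hRlit : PySem.List.pyRange 2 15 1 = [2,3,4,5,6,7,8,9,10,11,12,13,14] := by decide
  have hmemR : ∀ n : Int, 2 ≤ n → n ≤ 14 → n ∈ PySem.List.pyRange 2 15 1 := by
    intro n h2 h14; rw [hRlit]; simp; omega
  have hRsort : (PySem.List.pyRange 2 15 1).Pairwise (· < ·) := by rw [hRlit]; decide
  have hRnd : (PySem.List.pyRange 2 15 1).Nodup := hRsort.imp ne_of_lt
  have hmrs : ∀ n : Int, 2 ≤ n → n ≤ 14 → 2 ≤ List.count n values → n ∈ rs :=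
    fun n h2 h14 hc => (hmem n).mpr ⟨List.count_pos_iff.mp (by omega), h2, h14⟩
  have hb : ∀ n, n ∈ rs → 2 ≤ n ∧ n ≤ 14 := fun n hn => ((hmem n).mp hn).2
  have hR0 : PySem.List.pyRange 0 5 1 = [0,1,2,3,4] := by decide
  by_cases hq4 : ∃ q ∈ rs, List.count q values = 4
  · -- four of a kind
    obtain ⟨q, hqrs, hcq⟩ := hq4
    have hquiet : ∀ n ∈ PySem.List.pyRange 2 15 1, n ≠ q → pvQuiet values n := by
      intro n hn hnq
      refine ⟨?_, ?_, ?_⟩ <;> intro hcn <;> (have := bud2 n q hnq; omega)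
    rw [loop_quad values _ q 0 0 0 (hmemR q (hb q hqrs).1 (hb q hqrs).2) hcq hquiet]
    have hquads : rs.filter (fun n => (PySem.List.count values n : Int) == 4) = [q] := by
      apply filter_eq_singleton rs _ q hnd hqrs
      · simp [PySem.List.count_eq, hcq]
      · intro n hn hnq
        simp only [PySem.List.count_eq, beq_eq_false_iff_ne]
        have := bud2 n q hnq; omega
    rw [hquads]
    simp
  · have hquads : rs.filter (fun n => (PySem.List.count values n : Int) == 4) = [] := by
      apply List.filter_eq_nil_iff.mpr
      intro n hn
      simp only [PySem.List.count_eq, beq_iff_eq]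
      exact fun hc => hq4 ⟨n, hn, by exact_mod_cast hc⟩
    rw [hquads]
    have hnoquad : ∀ n : Int, n ∈ PySem.List.pyRange 2 15 1 → List.count n values ≠ 4 := by
      intro n hn hc
      have h2 : (2:Int) ≤ n := by rw [hRlit] at hn; simp at hn; omega
      have h14 : n ≤ 14 := by rw [hRlit] at hn; simp at hn; omega
      exact hq4 ⟨n, hmrs n h2 h14 (by omega), hc⟩
    by_cases ht3 : ∃ t ∈ rs, List.count t values = 3
    · obtain ⟨t, htrs, hct⟩ := ht3
      have htrips : rs.filter (fun n => (PySem.List.count values n : Int) == 3) = [t] := by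
        apply filter_eq_singleton rs _ t hnd htrs
        · simp [PySem.List.count_eq, hct]
        · intro n hn hnt
          simp only [PySem.List.count_eq, beq_eq_false_iff_ne]
          have := bud2 n t hnt; omega
      have ht0 : t ≠ 0 := by have := (hb t htrs).1; omega
      by_cases hp2 : ∃ p ∈ rs, List.count p values = 2
      · -- full house
        obtain ⟨p, hprs, hcp⟩ := hp2
        have hne : t ≠ p := by intro h; rw [h] at hct; omega
        have hp0 : p ≠ 0 := by have := (hb p hprs).1; omega
        have hpairs : rs.filter (fun n => (PySem.List.count values n : Int) == 2) = [p] := by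
          apply filter_eq_singleton rs _ p hnd hprs
          · simp [PySem.List.count_eq, hcp]
          · intro n hn hnp
            simp only [PySem.List.count_eq, beq_eq_false_iff_ne]
            intro hcn
            by_cases hnt : n = t
            · rw [hnt] at hcn; omega
            · have := bud3 n t p hnt hnp hne; omega
        have hquiet : ∀ n ∈ PySem.List.pyRange 2 15 1, n ≠ t → n ≠ p → pvQuiet values n := by
          intro n hn hnt hnp
          refine ⟨?_, ?_, ?_⟩ <;> intro hcn
          · have := bud3 n t p hnt hnp hne; omega
          · have := bud2 n t hnt; omega
          · exact hnoquad n hn hcn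
        rw [loop_trip_pair values _ t p hRnd
          (hmemR t (hb t htrs).1 (hb t htrs).2) (hmemR p (hb p hprs).1 (hb p hprs).2)
          hct hcp hne hquiet ht0 hp0]
        rw [htrips, hpairs]
        simp only [hR0, List.map_cons, List.map_nil, List.sum_cons, List.sum_nil, List.headD,
          List.length_cons, List.length_nil]
        norm_num
        split_ifs <;> norm_num [Int.toNat] <;> ring
      · -- three of a kind only
        have hpairs : rs.filter (fun n => (PySem.List.count values n : Int) == 2) = [] := by
          apply List.filter_eq_nil_iff.mpr
          intro n hn
          simp only [PySem.List.count_eq, beq_iff_eq]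
          exact fun hc => hp2 ⟨n, hn, by exact_mod_cast hc⟩
        have hquiet : ∀ n ∈ PySem.List.pyRange 2 15 1, n ≠ t → pvQuiet values n := by
          intro n hn hnt
          have h2 : (2:Int) ≤ n := by rw [hRlit] at hn; simp at hn; omega
          have h14 : n ≤ 14 := by rw [hRlit] at hn; simp at hn; omega
          refine ⟨?_, ?_, ?_⟩ <;> intro hcn
          · exact hp2 ⟨n, hmrs n h2 h14 (by omega), hcn⟩
          · have := bud2 n t hnt; omega
          · exact hnoquad n hn hcn
        rw [loop_trip_only values _ 0 t hRnd
          (hmemR t (hb t htrs).1 (hb t htrs).2) hct hquiet]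
        rw [htrips, hpairs]
        simp only [hR0, List.map_cons, List.map_nil, List.sum_cons, List.sum_nil, List.headD,
          List.length_nil]
        norm_num
        split_ifs <;> norm_num [Int.toNat] <;> ring
    · have htrips : rs.filter (fun n => (PySem.List.count values n : Int) == 3) = [] := by
        apply List.filter_eq_nil_iff.mpr
        intro n hn
        simp only [PySem.List.count_eq, beq_iff_eq]
        exact fun hc => ht3 ⟨n, hn, by exact_mod_cast hc⟩
      have hnotrip : ∀ n : Int, n ∈ PySem.List.pyRange 2 15 1 → List.count n values ≠ 3 := by
        intro n hn hc
        have h2 : (2:Int) ≤ n := by rw [hRlit] at hn; simp at hn; omega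
        have h14 : n ≤ 14 := by rw [hRlit] at hn; simp at hn; omega
        exact ht3 ⟨n, hmrs n h2 h14 (by omega), hc⟩
      rcases hPs : rs.filter (fun n => (PySem.List.count values n : Int) == 2) with _ | ⟨p, _ | ⟨q2, rest⟩⟩
      · -- high card / straight / flush
        have hquiet : ∀ n ∈ PySem.List.pyRange 2 15 1, pvQuiet values n := by
          intro n hn
          have h2 : (2:Int) ≤ n := by rw [hRlit] at hn; simp at hn; omega
          have h14 : n ≤ 14 := by rw [hRlit] at hn; simp at hn; omega
          refine ⟨?_, ?_, ?_⟩ <;> intro hcn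
          · have : n ∈ rs.filter (fun n => (PySem.List.count values n : Int) == 2) :=
              List.mem_filter.mpr ⟨hmrs n h2 h14 (by omega), by simp [PySem.List.count_eq, hcn]⟩
            rw [hPs] at this; cases this
          · exact hnotrip n hn hcn
          · exact hnoquad n hn hcn
        rw [loop_quiet values _ 0 0 0 hquiet]
        rw [htrips]
        simp only [hR0, List.map_cons, List.map_nil, List.sum_cons, List.sum_nil, List.headD,
          List.length_nil]
        norm_num
        split_ifs <;> norm_num [Int.toNat] <;> ring
      · -- one pair
        have hpP : p ∈ rs.filter (fun n => (PySem.List.count values n : Int) == 2) := by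
          rw [hPs]; exact List.mem_cons_self ..
        obtain ⟨hprs, hcpb⟩ := List.mem_filter.mp hpP
        have hcp : List.count p values = 2 := by
          simp only [PySem.List.count_eq, beq_iff_eq] at hcpb
          exact_mod_cast hcpb
        have hp0 : p ≠ 0 := by have := (hb p hprs).1; omega
        have hquiet : ∀ n ∈ PySem.List.pyRange 2 15 1, n ≠ p → pvQuiet values n := by
          intro n hn hnp
          have h2 : (2:Int) ≤ n := by rw [hRlit] at hn; simp at hn; omega
          have h14 : n ≤ 14 := by rw [hRlit] at hn; simp at hn; omega
          refine ⟨?_, ?_, ?_⟩ <;> intro hcn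
          · have : n ∈ rs.filter (fun n => (PySem.List.count values n : Int) == 2) :=
              List.mem_filter.mpr ⟨hmrs n h2 h14 (by omega), by simp [PySem.List.count_eq, hcn]⟩
            rw [hPs] at this
            simp at this
            exact hnp this
          · exact hnotrip n hn hcn
          · exact hnoquad n hn hcn
        rw [loop_pair_only values _ p hRnd
          (hmemR p (hb p hprs).1 (hb p hprs).2) hcp hquiet]
        rw [htrips]
        simp only [hR0, List.map_cons, List.map_nil, List.sum_cons, List.sum_nil, List.headD,
          List.length_cons, List.length_nil]
        norm_num
        split_ifs <;> norm_num [Int.toNat] <;> ring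
      · -- two pairs
        have hPsort : (rs.filter (fun n => (PySem.List.count values n : Int) == 2)).Pairwise (· < ·) :=
          hsort.filter _
        rw [hPs] at hPsort
        have hplq : p < q2 := (List.pairwise_cons.mp hPsort).1 q2 (List.mem_cons_self ..)
        have hmemf : ∀ n, n ∈ rs.filter (fun m => (PySem.List.count values m : Int) == 2) →
            n ∈ rs ∧ List.count n values = 2 := by
          intro n hn
          obtain ⟨h1, h2⟩ := List.mem_filter.mp hn
          simp only [PySem.List.count_eq, beq_iff_eq] at h2
          exact ⟨h1, by exact_mod_cast h2⟩
        have hpP : p ∈ rs ∧ List.count p values = 2 := hmemf p (by rw [hPs]; simp)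
        have hqP : q2 ∈ rs ∧ List.count q2 values = 2 := hmemf q2 (by rw [hPs]; simp)
        have hrest : rest = [] := by
          rcases rest with _ | ⟨r, rest2⟩
          · rfl
          · exfalso
            have hrP : r ∈ rs ∧ List.count r values = 2 := hmemf r (by rw [hPs]; simp)
            have h1 : p < r := (List.pairwise_cons.mp hPsort).1 r (by simp)
            have h2 : q2 < r :=
              (List.pairwise_cons.mp (List.pairwise_cons.mp hPsort).2).1 r (by simp)
            have := bud3 p q2 r (by omega) (by omega) (by omega)
            rw [hpP.2, hqP.2, hrP.2] at this
            omega
        subst hrest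
        have hquiet : ∀ n ∈ PySem.List.pyRange 2 15 1, n ≠ p → n ≠ q2 → pvQuiet values n := by
          intro n hn hnp hnq
          have h2 : (2:Int) ≤ n := by rw [hRlit] at hn; simp at hn; omega
          have h14 : n ≤ 14 := by rw [hRlit] at hn; simp at hn; omega
          refine ⟨?_, ?_, ?_⟩ <;> intro hcn
          · have : n ∈ rs.filter (fun m => (PySem.List.count values m : Int) == 2) :=
              List.mem_filter.mpr ⟨hmrs n h2 h14 (by omega), by simp [PySem.List.count_eq, hcn]⟩
            rw [hPs] at this
            simp at this
            rcases this with h | h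
            · exact hnp h
            · exact hnq h
          · exact hnotrip n hn hcn
          · exact hnoquad n hn hcn
        rw [loop_two_pairs values _ p q2 hRsort
          (hmemR p (hb p hpP.1).1 (hb p hpP.1).2) (hmemR q2 (hb q2 hqP.1).1 (hb q2 hqP.1).2)
          hpP.2 hqP.2 hplq hquiet (by have := (hb p hpP.1).1; omega)]
        rw [htrips]
        have hget1 : (PySem.List.pyGet? [p, q2] (1:Int)).getD 0 = q2 := rfl
        simp only [hR0, List.map_cons, List.map_nil, List.sum_cons, List.sum_nil, List.headD,
          List.length_cons, List.length_nil, hget1]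
        norm_num
        split_ifs <;> norm_num [Int.toNat] <;> ring

-- ===== VERDICT (by name: the statement is the Claim_ definition above) =====
theorem scores_spec : Claim_equal_scores := by
  unfold Claim_equal_scores
  intro values flush _ hpre
  unfold Spec_scores
  exact scores_eq values flush hpre
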